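-- pv_equiv track=rewrite | github.com/yilun1213/Quadtree_ddCRP_GenModel_for_Image_Segmentation | experiments/exp.3.1.1/generate.py | _compute_region_perimeter
-- ===== SOURCE A (Python) =====
-- def _compute_region_perimeter(pixels: set[tuple[int, int]]) -> int:
--     perimeter = 0
--     for i, j in pixels:
--         if (i - 1, j) not in pixels:
--             perimeter += 1
--         if (i + 1, j) not in pixels:
--             perimeter += 1
--         if (i, j - 1) not in pixels:
--             perimeter += 1
--         if (i, j + 1) not in pixels:
--             perimeter += 1
--     return perimeter
-- ===== SOURCE B (Python) =====
-- def _compute_region_perimeter(pixels: set[tuple[int, int]]) -> int: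
--     # polyomino identity: perimeter = 4*|pixels| - 2*(internal shared edges)
--     shared = 0
--     for i, j in pixels:
--         if (i + 1, j) in pixels:
--             shared += 1
--         if (i, j + 1) in pixels:
--             shared += 1
--     return 4 * len(pixels) - 2 * shared
-- ===== Notes on version B (the rewrite author's own statement) =====
-- stated objective: alternative
-- what changed: B counts each internal shared edge once (right/down neighbors only) and returns 4*len(pixels) - 2*shared, instead of A's per-pixel tally of exposed edges over all four directions.
import Mathlib
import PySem

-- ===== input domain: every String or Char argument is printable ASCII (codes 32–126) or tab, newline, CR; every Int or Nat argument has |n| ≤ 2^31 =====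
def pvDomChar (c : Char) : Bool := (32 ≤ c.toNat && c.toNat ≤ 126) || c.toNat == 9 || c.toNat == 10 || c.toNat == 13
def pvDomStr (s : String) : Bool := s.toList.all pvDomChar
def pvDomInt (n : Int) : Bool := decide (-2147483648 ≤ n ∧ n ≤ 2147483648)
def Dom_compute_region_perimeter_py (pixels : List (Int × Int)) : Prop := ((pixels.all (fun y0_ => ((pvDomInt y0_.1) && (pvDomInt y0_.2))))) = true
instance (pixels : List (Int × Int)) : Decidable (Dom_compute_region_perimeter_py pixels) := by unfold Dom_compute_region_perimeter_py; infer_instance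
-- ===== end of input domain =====

-- B computes the perimeter by the polyomino identity 4*n - 2*(shared internal edges),
-- counting only right/down neighbors, instead of A's per-pixel exposed-edge tally.
-- ===== PORT A =====
def pvStepA (S : List (Int × Int)) (perimeter : Int) (ij : Int × Int) : Int :=
  let p1 := if (ij.1 - 1, ij.2) ∉ S then perimeter + 1 else perimeter
  let p2 := if (ij.1 + 1, ij.2) ∉ S then p1 + 1 else p1
  let p3 := if (ij.1, ij.2 - 1) ∉ S then p2 + 1 else p2
  if (ij.1, ij.2 + 1) ∉ S then p3 + 1 else p3

def compute_region_perimeter_py (pixels : List (Int × Int)) : Int :=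
  pixels.foldl (pvStepA pixels) 0

-- ===== PORT B =====
def pvStepB (S : List (Int × Int)) (shared : Int) (ij : Int × Int) : Int :=
  let s1 := if (ij.1 + 1, ij.2) ∈ S then shared + 1 else shared
  if (ij.1, ij.2 + 1) ∈ S then s1 + 1 else s1

def compute_region_perimeter_py_alt (pixels : List (Int × Int)) : Int :=
  4 * (pixels.length : Int) - 2 * pixels.foldl (pvStepB pixels) 0

-- ===== PRECONDITION & SPEC =====
-- Pre_: the list holds the DISTINCT elements of the Python set (the representation
-- invariant of set[tuple[int,int]] under the type convention); it excludes no Python input.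
def Pre_compute_region_perimeter_py (pixels : List (Int × Int)) : Prop := pixels.Nodup
instance (pixels : List (Int × Int)) : Decidable (Pre_compute_region_perimeter_py pixels) := by unfold Pre_compute_region_perimeter_py; infer_instance
def pvWitness_compute_region_perimeter_py : (List (Int × Int)) := [(0, 0), (1, 0), (1, 1)]

def Spec_compute_region_perimeter_py (pixels : List (Int × Int)) (out : Int) : Prop := out = compute_region_perimeter_py_alt pixels
instance (pixels : List (Int × Int)) (out : Int) : Decidable (Spec_compute_region_perimeter_py pixels out) := by unfold Spec_compute_region_perimeter_py; infer_instance

-- ===== CLAIM (what is proved, stated in full; the proofs are below) =====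
def Claim_equal_compute_region_perimeter_py : Prop := ∀ (pixels : List (Int × Int)), Dom_compute_region_perimeter_py pixels → Pre_compute_region_perimeter_py pixels → Spec_compute_region_perimeter_py pixels (compute_region_perimeter_py pixels)

-- ===== LEMMAS AND PROOFS =====

lemma pvFoldA (S L : List (Int × Int)) (c : Int) :
    L.foldl (pvStepA S) c =
      c + 4 * (L.length : Int)
        - (L.countP (fun p => decide ((p.1 - 1, p.2) ∈ S)) : Int)
        - (L.countP (fun p => decide ((p.1 + 1, p.2) ∈ S)) : Int)
        - (L.countP (fun p => decide ((p.1, p.2 - 1) ∈ S)) : Int)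
        - (L.countP (fun p => decide ((p.1, p.2 + 1) ∈ S)) : Int) := by
  induction L generalizing c with
  | nil => simp
  | cons a t ih =>
    simp only [List.foldl_cons, List.countP_cons, List.length_cons, ih, pvStepA,
      decide_eq_true_eq]
    by_cases h1 : (a.1 - 1, a.2) ∈ S <;> by_cases h2 : (a.1 + 1, a.2) ∈ S <;>
      by_cases h3 : (a.1, a.2 - 1) ∈ S <;> by_cases h4 : (a.1, a.2 + 1) ∈ S <;>
      simp only [h1, h2, h3, h4, if_true, if_false, not_true, not_false_iff] <;>
      push_cast <;> omega

lemma pvFoldB (S L : List (Int × Int)) (c : Int) :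
    L.foldl (pvStepB S) c =
      c + (L.countP (fun p => decide ((p.1 + 1, p.2) ∈ S)) : Int)
        + (L.countP (fun p => decide ((p.1, p.2 + 1) ∈ S)) : Int) := by
  induction L generalizing c with
  | nil => simp
  | cons a t ih =>
    simp only [List.foldl_cons, List.countP_cons, ih, pvStepB, decide_eq_true_eq]
    by_cases h2 : (a.1 + 1, a.2) ∈ S <;> by_cases h4 : (a.1, a.2 + 1) ∈ S <;>
      simp only [h2, h4, if_true, if_false] <;> push_cast <;> omega

-- With no duplicates, # pixels whose shifted-down copy is present equals
-- # pixels whose shifted-up copy is present (translation bijection).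
lemma pvCountShift (S : List (Int × Int)) (h : S.Nodup) (e : Int × Int) :
    S.countP (fun p => decide ((p.1 - e.1, p.2 - e.2) ∈ S)) =
    S.countP (fun p => decide ((p.1 + e.1, p.2 + e.2) ∈ S)) := by
  classical
  have hcount : ∀ (q : (Int × Int) → Bool),
      S.countP q = (S.toFinset.filter (fun x => q x = true)).card := by
    intro q
    rw [List.countP_eq_length_filter, ← List.toFinset_card_of_nodup (h.filter q)]
    congr 1
    ext x
    simp
  rw [hcount, hcount]
  apply Finset.card_nbij (fun p => (p.1 - e.1, p.2 - e.2))
  · intro p hp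
    simp only [Finset.mem_coe, Finset.mem_filter, List.mem_toFinset, decide_eq_true_eq] at hp ⊢
    refine ⟨hp.2, ?_⟩
    have : (p.1 - e.1 + e.1, p.2 - e.2 + e.2) = p := by
      exact Prod.ext (by omega) (by omega)
    rw [this]; exact hp.1
  · intro p hp q hq hpq
    simp only [Prod.mk.injEq] at hpq
    exact Prod.ext (by omega) (by omega)
  · intro q hq
    simp only [Finset.coe_filter, Set.mem_image, Set.mem_setOf_eq, List.mem_toFinset,
      decide_eq_true_eq] at hq ⊢
    refine ⟨(q.1 + e.1, q.2 + e.2), ⟨hq.2, ?_⟩, by exact Prod.ext (by omega) (by omega)⟩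
    have : (q.1 + e.1 - e.1, q.2 + e.2 - e.2) = q := Prod.ext (by omega) (by omega)
    rw [this]; exact hq.1

-- ===== VERDICT (by name: the statement is the Claim_ definition above) =====
theorem compute_region_perimeter_py_spec : Claim_equal_compute_region_perimeter_py := by
  intro pixels _ hpre
  unfold Spec_compute_region_perimeter_py compute_region_perimeter_py compute_region_perimeter_py_alt
  rw [pvFoldA pixels pixels 0, pvFoldB pixels pixels 0]
  have h1 := pvCountShift pixels hpre (1, 0)
  have h2 := pvCountShift pixels hpre (0, 1)
  simp only [add_zero, sub_zero] at h1 h2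
  omega
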